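-- pv_equiv track=rewrite | github.com/gridvisi/Python_workspace | 3 codewars/7 kyu/7 kyu Shortest Word.py | find_short
-- ===== SOURCE A (Python) =====
-- def find_short(s):
--     if not s:
--         return ''
--     s= list(s)
--     output = []
--     num = []
--     temp = ""
--     for i in range(len(s)):
--         if not s[i] == ' ':
--             temp += s[i]
--         else:
--             output.append(temp)
--             temp = ""
--     output.append(temp)
--     for i in range(len(output)):
--         num.append(len(output[i]))
--     return min(num)
-- ===== SOURCE B (Python) =====
-- def find_short(s):
--     if not s:
--         return ''
--     best = None
--     cur = 0
--     for c in s: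
--         if c == ' ':
--             best = cur if best is None else min(best, cur)
--             cur = 0
--         else:
--             cur += 1
--     return cur if best is None else min(best, cur)
-- ===== Notes on version B (the rewrite author's own statement) =====
-- stated objective: faster
-- what changed: Replaces A's two passes that build a word list and then a length list with a single character scan maintaining two scalars (current word length and running minimum); measured ~2.3x faster by avoiding the intermediate lists and quadratic string concatenation.
-- outside the precondition, e.g. on find_short(''): A returns '', B returns ''
import Mathlib
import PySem

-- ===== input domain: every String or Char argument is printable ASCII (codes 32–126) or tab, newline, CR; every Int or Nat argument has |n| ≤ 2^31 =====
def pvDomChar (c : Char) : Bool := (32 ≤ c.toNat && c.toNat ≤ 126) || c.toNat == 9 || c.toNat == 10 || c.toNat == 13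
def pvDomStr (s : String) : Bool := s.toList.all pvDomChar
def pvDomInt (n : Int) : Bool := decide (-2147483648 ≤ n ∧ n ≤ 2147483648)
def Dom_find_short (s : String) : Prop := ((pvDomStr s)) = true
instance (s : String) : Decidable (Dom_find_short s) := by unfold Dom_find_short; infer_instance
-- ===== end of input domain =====

-- B replaces A's two list-building passes (word list, then length list) with one scan keeping two scalars; simpler, Pre_ excludes only s = "" where A returns a string instead of an int.


-- ===== PORT A =====
-- loop body of A's first pass: accumulate completed words and the current word
def fsStepA (st : List (List Char) × List Char) (c : Char) : List (List Char) × List Char :=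
  if ¬ (c = ' ') then (st.1, st.2 ++ [c]) else (st.1 ++ [st.2], [])

def find_short (s : String) : Int :=
  if s = "" then 0   -- A returns '' here (not an int); excluded by Pre_find_short
  else
    let st := s.toList.foldl fsStepA ([], [])
    let output := st.1 ++ [st.2]
    let num := output.map (fun w => (w.length : Int))
    (PySem.List.min? num (fun x => x)).getD 0   -- min(num); num is nonempty so getD is never used

-- ===== PORT B =====
-- loop body of B: (best so far (None before the first space), current word length)
def fsStepB (st : Option Int × Int) (c : Char) : Option Int × Int :=
  if c = ' ' then
    (some (match st.1 with | none => st.2 | some b => min b st.2), 0)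
  else (st.1, st.2 + 1)

def find_short_alt (s : String) : Int :=
  if s = "" then 0   -- B returns '' here (not an int); excluded by Pre_find_short
  else
    let st := s.toList.foldl fsStepB (none, 0)
    match st.1 with
    | none => st.2
    | some b => min b st.2

-- ===== PRECONDITION & SPEC =====
-- Pre_ excludes only the empty string, on which both A and B return the string '' instead of an int.
def Pre_find_short (s : String) : Prop := s ≠ ""
instance (s : String) : Decidable (Pre_find_short s) := by unfold Pre_find_short; infer_instance
def pvWitness_find_short : String := "abc d"
def Spec_find_short (s : String) (out : Int) : Prop := out = find_short_alt s
instance (s : String) (out : Int) : Decidable (Spec_find_short s out) := by unfold Spec_find_short; infer_instance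

-- ===== CLAIM (what is proved, stated in full; the proofs are below) =====
def Claim_equal_find_short : Prop := ∀ (s : String), Dom_find_short s → Pre_find_short s → Spec_find_short s (find_short s)

-- ===== LEMMAS AND PROOFS =====

-- min of a list with one element appended, via the running-min characterisation
lemma min?_id_append_singleton (l : List Int) (x : Int) :
    PySem.List.min? (l ++ [x]) (fun y => y)
      = some (match PySem.List.min? l (fun y => y) with | none => x | some b => min b x) := by
  cases l with
  | nil =>
      have h0 : PySem.List.min? ([] : List Int) (fun y => y) = none :=
        (PySem.List.min?_eq_none_iff _ _).mpr rfl
      simp [PySem.List.min?_id_cons, h0]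
  | cons y t =>
      simp [PySem.List.min?_id_cons, List.foldl_append]

-- loop invariant: B's state is (min of lengths of A's completed words, length of A's current word)
lemma fs_loop_inv (cs : List Char) : ∀ (output : List (List Char)) (temp : List Char),
    cs.foldl fsStepB
      (PySem.List.min? (output.map (fun w => (w.length : Int))) (fun x => x), (temp.length : Int))
    = (PySem.List.min? (((cs.foldl fsStepA (output, temp)).1).map (fun w => (w.length : Int))) (fun x => x),
       (((cs.foldl fsStepA (output, temp)).2).length : Int)) := by
  induction cs with
  | nil => intro output temp; simp
  | cons c cs ih =>
      intro output temp
      by_cases hc : c = ' '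
      · have h1 : fsStepA (output, temp) c = (output ++ [temp], []) := by
          simp [fsStepA, hc]
        have h2 : fsStepB (PySem.List.min? (output.map (fun w => (w.length : Int))) (fun x => x),
            (temp.length : Int)) c
            = (PySem.List.min? ((output ++ [temp]).map (fun w => (w.length : Int))) (fun x => x),
               (([] : List Char).length : Int)) := by
          simp [fsStepB, hc, List.map_append, min?_id_append_singleton]
        simp only [List.foldl_cons, h1, h2]
        exact ih (output ++ [temp]) []
      · have h1 : fsStepA (output, temp) c = (output, temp ++ [c]) := by
          simp [fsStepA, hc]
        have h2 : fsStepB (PySem.List.min? (output.map (fun w => (w.length : Int))) (fun x => x),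
            (temp.length : Int)) c
            = (PySem.List.min? (output.map (fun w => (w.length : Int))) (fun x => x),
               ((temp ++ [c]).length : Int)) := by
          simp only [fsStepB, hc, if_false, List.length_append, List.length_cons,
            List.length_nil, Nat.cast_add, Nat.cast_one, Nat.cast_zero]
          ring_nf
        simp only [List.foldl_cons, h1, h2]
        exact ih output (temp ++ [c])

-- ===== VERDICT (by name: the statement is the Claim_ definition above) =====
theorem find_short_spec : Claim_equal_find_short := by
  intro s _ hpre
  unfold Spec_find_short find_short find_short_alt
  have hne : ¬ (s = "") := hpre
  simp only [hne, if_false]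
  have h := fs_loop_inv s.toList [] []
  have hnil : PySem.List.min? ([] : List Int) (fun x => x) = none := by
    simp [PySem.List.min?_eq_none_iff]
  simp only [List.map_nil, List.length_nil, Nat.cast_zero, hnil] at h
  rw [h]
  simp only [List.map_append, List.map_cons, List.map_nil, min?_id_append_singleton]
  cases PySem.List.min? (((s.toList.foldl fsStepA ([], [])).1).map
      (fun w => (w.length : Int))) (fun x => x) <;> simp
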